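-- pv_equiv track=rewrite | github.com/eunjng5474/Algorithm | 프로그래머스/1/159994. 카드 뭉치/카드 뭉치.py | solution
-- ===== SOURCE A (Python) =====
-- def solution(cards1, cards2, goal):
--     n = len(cards1)
--     m = len(cards2)
--     i, j = 0, 0
--
--     for g in goal:
--         if i < n and cards1[i] == g:
--             i += 1
--         if j < m and cards2[j] == g:
--             j += 1
--
--     if i+j == len(goal):
--         return "Yes"
--
--     return "No"
-- ===== SOURCE B (Python) =====
-- def prefix_match(deck, goal):
--     # longest prefix of deck matched greedily as a subsequence of goal
--     rest = deck
--     for g in goal: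
--         if rest and rest[0] == g:
--             rest = rest[1:]
--     return len(deck) - len(rest)
--
-- def solution(cards1, cards2, goal):
--     return "Yes" if prefix_match(cards1, goal) + prefix_match(cards2, goal) == len(goal) else "No"
-- ===== Notes on version B (the rewrite author's own statement) =====
-- stated objective: simpler
-- what changed: Replaces A's single fused loop carrying two index counters with two independent passes of a helper prefix_match that walks goal once while consuming the deck's remaining prefix list, then compares the sum of matched prefix lengths to len(goal).
import Mathlib
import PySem

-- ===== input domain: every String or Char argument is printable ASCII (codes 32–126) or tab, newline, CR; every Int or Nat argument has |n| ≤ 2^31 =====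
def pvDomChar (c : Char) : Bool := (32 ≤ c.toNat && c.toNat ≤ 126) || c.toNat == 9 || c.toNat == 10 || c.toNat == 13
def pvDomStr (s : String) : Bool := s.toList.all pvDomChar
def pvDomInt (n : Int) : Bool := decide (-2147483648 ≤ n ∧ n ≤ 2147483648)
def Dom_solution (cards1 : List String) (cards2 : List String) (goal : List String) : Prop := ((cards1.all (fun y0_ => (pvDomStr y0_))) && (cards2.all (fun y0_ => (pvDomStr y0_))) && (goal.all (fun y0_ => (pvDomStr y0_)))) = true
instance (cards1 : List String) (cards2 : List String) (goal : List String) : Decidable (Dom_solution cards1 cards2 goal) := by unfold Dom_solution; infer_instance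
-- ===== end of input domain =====

-- B replaces A's single fused two-counter loop with two independent prefix-match passes; objective: simpler.

-- ===== PORT A =====
-- one step of A's loop body for one deck: advance the index if it points at g
def solStep (deck : List String) (i : Nat) (g : String) : Nat :=
  if i < deck.length ∧ deck.getD i "" = g then i + 1 else i

def solution (cards1 : List String) (cards2 : List String) (goal : List String) : String :=
  let p := goal.foldl
    (fun (s : Nat × Nat) g => (solStep cards1 s.1 g, solStep cards2 s.2 g)) (0, 0)
  if p.1 + p.2 = goal.length then "Yes" else "No"

-- ===== PORT B =====
-- walk goal once, consuming the deck's remaining prefix on a front match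
def prefixRest : List String → List String → List String
  | rest, [] => rest
  | [], _ :: gs => prefixRest [] gs
  | d :: ds, g :: gs => if d = g then prefixRest ds gs else prefixRest (d :: ds) gs

def prefixMatch (deck : List String) (goal : List String) : Nat :=
  deck.length - (prefixRest deck goal).length

def solution_alt (cards1 : List String) (cards2 : List String) (goal : List String) : String :=
  if prefixMatch cards1 goal + prefixMatch cards2 goal = goal.length then "Yes" else "No"

-- ===== PRECONDITION & SPEC =====
def Spec_solution (cards1 : List String) (cards2 : List String) (goal : List String) (out : String) : Prop := out = solution_alt cards1 cards2 goal
instance (cards1 : List String) (cards2 : List String) (goal : List String) (out : String) : Decidable (Spec_solution cards1 cards2 goal out) := by unfold Spec_solution; infer_instance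

-- ===== CLAIM (what is proved, stated in full; the proofs are below) =====
def Claim_equal_solution : Prop := ∀ (cards1 : List String) (cards2 : List String) (goal : List String), Dom_solution cards1 cards2 goal → Spec_solution cards1 cards2 goal (solution cards1 cards2 goal)

-- ===== LEMMAS AND PROOFS =====

theorem prefixRest_length_le (deck goal : List String) :
    (prefixRest deck goal).length ≤ deck.length := by
  induction goal generalizing deck with
  | nil => simp [prefixRest]
  | cons g gs ih =>
    cases deck with
    | nil => simpa [prefixRest] using ih []
    | cons d ds =>
      simp only [prefixRest]
      split
      · exact le_trans (ih ds) (by simp)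
      · exact ih (d :: ds)

-- A's per-deck counter starting from i equals i plus B's match count on the dropped deck
theorem foldl_step_eq (goal deck : List String) (i : Nat) :
    goal.foldl (solStep deck) i = i + prefixMatch (deck.drop i) goal := by
  induction goal generalizing i with
  | nil => simp [prefixMatch, prefixRest]
  | cons g gs ih =>
    simp only [List.foldl_cons]
    by_cases h : i < deck.length ∧ deck.getD i "" = g
    · have hlt := h.1
      have hdrop : deck.drop i = deck[i] :: deck.drop (i + 1) :=
        List.drop_eq_getElem_cons hlt
      have hget : deck.getD i "" = deck[i] := List.getD_eq_getElem deck "" hlt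
      rw [solStep, if_pos h, ih]
      have hd : deck[i] = g := by rw [← hget]; exact h.2
      have hle := prefixRest_length_le (deck.drop (i+1)) gs
      simp only [prefixMatch, hdrop, hd, prefixRest]
      have hlen : (deck.drop (i+1)).length ≤ deck.length - i - 1 := by
        simp [List.length_drop]; omega
      simp [List.length_drop] at hle ⊢
      omega
    · rw [solStep, if_neg h, ih]
      congr 1
      simp only [prefixMatch]
      congr 1
      rcases Nat.lt_or_ge i deck.length with hlt | hge
      · have hdrop : deck.drop i = deck[i] :: deck.drop (i + 1) :=
          List.drop_eq_getElem_cons hlt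
        have hget : deck.getD i "" = deck[i] := List.getD_eq_getElem deck "" hlt
        have hne : deck[i] ≠ g := fun he => h ⟨hlt, by rw [hget, he]⟩
        rw [hdrop]
        simp [prefixRest, hne]
      · have hdrop : deck.drop i = ([] : List String) := List.drop_eq_nil_of_le hge
        rw [hdrop]
        simp [prefixRest]

theorem foldl_pair (goal : List String) (c1 c2 : List String) (s : Nat × Nat) :
    goal.foldl (fun (s : Nat × Nat) g => (solStep c1 s.1 g, solStep c2 s.2 g)) s
      = (goal.foldl (solStep c1) s.1, goal.foldl (solStep c2) s.2) := by
  induction goal generalizing s with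
  | nil => rfl
  | cons g gs ih => simp [List.foldl_cons, ih]

-- ===== VERDICT (by name: the statement is the Claim_ definition above) =====
theorem solution_spec : Claim_equal_solution := by
  intro c1 c2 goal _
  unfold Spec_solution solution solution_alt
  rw [foldl_pair, foldl_step_eq, foldl_step_eq]
  simp
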